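-- pv_equiv track=rewrite | github.com/wendellavila/leetcode | 1071_gcd_strings.py | isDivisor
-- ===== SOURCE A (Python) =====
-- def isDivisor(divisor:str, dividend:str) -> bool:
--     """
--     If the length of the dividend string is not a divisor of the length of the divisor string, return false
--     Otherwise, slice divident in pieces of the same size as the divisor, checking if the slice is equal to the divisor
--     If all slices are equal, return true, otherwise return false.
--     """
--     if len(dividend) % len(divisor) == 0:
--         count = 0
--         for j in range(0, len(dividend)//len(divisor)):
--             tmp_slice = dividend[(j*len(divisor)):(j*len(divisor)+len(divisor))]
--             if tmp_slice == divisor: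
--                 count += 1
--         if count == len(dividend)//len(divisor):
--             return True
--         else:
--             return False
--     else:
--         return False
-- ===== SOURCE B (Python) =====
-- def isDivisor(divisor: str, dividend: str) -> bool:
--     if len(dividend) % len(divisor) != 0:
--         return False
--     return divisor * (len(dividend) // len(divisor)) == dividend
-- ===== Notes on version B (the rewrite author's own statement) =====
-- stated objective: idiomatic
-- what changed: Replaces the per-block slice-and-count loop with a single closed-form comparison: build divisor * (len(dividend)//len(divisor)) once and compare it with dividend.
import Mathlib
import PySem

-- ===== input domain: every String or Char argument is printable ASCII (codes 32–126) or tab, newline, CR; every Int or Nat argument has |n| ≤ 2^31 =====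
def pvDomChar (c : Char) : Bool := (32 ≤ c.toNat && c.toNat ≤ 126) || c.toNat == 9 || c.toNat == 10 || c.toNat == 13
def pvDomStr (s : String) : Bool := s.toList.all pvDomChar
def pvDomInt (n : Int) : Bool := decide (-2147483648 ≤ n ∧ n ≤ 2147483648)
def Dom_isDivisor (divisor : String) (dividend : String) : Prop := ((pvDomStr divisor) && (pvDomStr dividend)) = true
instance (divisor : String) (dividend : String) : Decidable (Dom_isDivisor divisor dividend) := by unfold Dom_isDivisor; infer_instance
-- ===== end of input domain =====

-- B replaces A's per-block slice-and-count loop by one closed-form comparison: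
-- divisor repeated (len(dividend)//len(divisor)) times equals dividend.

-- ===== PORT A =====
def isDivisor (divisor : String) (dividend : String) : Bool :=
  let dv := divisor.toList
  let dd := dividend.toList
  if PySem.Int.mod (PySem.List.len dd) (PySem.List.len dv) = 0 then
    let q := PySem.Int.floordiv (PySem.List.len dd) (PySem.List.len dv)
    let count := (PySem.List.pyRange 0 q 1).foldl (fun c j =>
      let tmp_slice := PySem.List.slice dd
        (some (j * PySem.List.len dv)) (some (j * PySem.List.len dv + PySem.List.len dv))
      if tmp_slice = dv then c + 1 else c) (0 : Int)
    if count = q then true else false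
  else false

-- ===== PORT B =====
def isDivisor_alt (divisor : String) (dividend : String) : Bool :=
  let dv := divisor.toList
  let dd := dividend.toList
  if PySem.Int.mod (PySem.List.len dd) (PySem.List.len dv) ≠ 0 then false
  else PySem.List.pyRepeat dv (PySem.Int.floordiv (PySem.List.len dd) (PySem.List.len dv)) == dd

-- ===== PRECONDITION & SPEC =====
-- Pre_ excludes only the empty divisor, on which Python A raises ZeroDivisionError
-- (len(dividend) % len(divisor)); B raises there too.
def Pre_isDivisor (divisor : String) (dividend : String) : Prop := divisor ≠ ""
instance (divisor : String) (dividend : String) : Decidable (Pre_isDivisor divisor dividend) := by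
  unfold Pre_isDivisor; infer_instance

def pvWitness_isDivisor : String × String := ("ab", "ababab")

def Spec_isDivisor (divisor : String) (dividend : String) (out : Bool) : Prop := out = isDivisor_alt divisor dividend
instance (divisor : String) (dividend : String) (out : Bool) : Decidable (Spec_isDivisor divisor dividend out) := by unfold Spec_isDivisor; infer_instance

-- ===== CLAIM (what is proved, stated in full; the proofs are below) =====
def Claim_equal_isDivisor : Prop := ∀ (divisor : String) (dividend : String), Dom_isDivisor divisor dividend → Pre_isDivisor divisor dividend → Spec_isDivisor divisor dividend (isDivisor divisor dividend)

-- ===== LEMMAS AND PROOFS =====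

-- pyRepeat is flatten of replicate (definitional for a Nat cast count).
theorem pyRepeat_eq_flatten (dv : List Char) (q : Nat) :
    PySem.List.pyRepeat dv (q : Int) = (List.replicate q dv).flatten := rfl

-- Prop-condition bridge to PySem.List.foldl_count_if (whose ite condition is Bool-valued)
theorem foldl_count_ite {α : Type} (P : α → Prop) [DecidablePred P] (l : List α) (a : Int) :
    List.foldl (fun c x => if P x then c + 1 else c) a l
      = a + ((l.countP (fun x => decide (P x)) : Nat) : Int) := by
  rw [show (fun (c : Int) x => if P x then c + 1 else c)
      = (fun (c : Int) x => if decide (P x) = true then c + 1 else c) from by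
    funext c x; simp]
  exact PySem.List.foldl_count_if (fun x => decide (P x)) l a

-- each width-|dv| block of dv repeated q times is dv
theorem tiles_aux (dv : List Char) (q : Nat) (k : Nat) (hk : k < q) :
    (((List.replicate q dv).flatten).drop (k * dv.length)).take dv.length = dv := by
  induction q generalizing k with
  | zero => omega
  | succ q ih =>
    rw [List.replicate_succ, List.flatten_cons]
    cases k with
    | zero => simp
    | succ k =>
      have h : (k + 1) * dv.length = dv.length + k * dv.length := by ring
      rw [h, List.drop_length_add_append]
      exact ih k (by omega)

-- tiling characterisation: all blocks equal dv ↔ dd is dv repeated q times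
theorem tiles (dv : List Char) (q : Nat) : ∀ dd : List Char, dd.length = q * dv.length →
    ((∀ k < q, (dd.drop (k * dv.length)).take dv.length = dv) ↔
      dd = (List.replicate q dv).flatten) := by
  induction q with
  | zero =>
    intro dd h
    simp at h
    subst h
    simp
  | succ q ih =>
    intro dd h
    constructor
    · intro hall
      have h0 : dd.take dv.length = dv := by simpa using hall 0 (Nat.succ_pos q)
      have hrest : dd.drop dv.length = (List.replicate q dv).flatten := by
        apply (ih (dd.drop dv.length) (by simp [h, Nat.succ_mul])).mp
        intro k hk
        have hk1 := hall (k + 1) (by omega)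
        rw [List.drop_drop]
        have harith : dv.length + k * dv.length = (k + 1) * dv.length := by ring
        rw [harith]
        exact hk1
      calc dd = dd.take dv.length ++ dd.drop dv.length := (List.take_append_drop _ _).symm
        _ = (List.replicate (q + 1) dv).flatten := by
            rw [h0, hrest, List.replicate_succ, List.flatten_cons]
    · intro hdd k hk
      subst hdd
      exact tiles_aux dv (q + 1) k hk

-- ===== VERDICT (by name: the statement is the Claim_ definition above) =====
theorem isDivisor_spec : Claim_equal_isDivisor := by
  intro divisor dividend _ hpre
  unfold Spec_isDivisor isDivisor isDivisor_alt
  have hL : 0 < divisor.toList.length := by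
    cases hvl : divisor.toList with
    | nil => exact absurd (by simpa using congrArg String.ofList hvl) hpre
    | cons a l => simp
  set dv := divisor.toList
  set dd := dividend.toList
  simp only [PySem.List.len_eq, PySem.Int.mod_natCast, PySem.Int.floordiv_natCast]
  by_cases hdvd : dd.length % dv.length = 0
  · have hdvd' : dv.length ∣ dd.length := Nat.dvd_of_mod_eq_zero hdvd
    set q := dd.length / dv.length with hq
    have hlen : dd.length = q * dv.length := (Nat.div_mul_cancel hdvd').symm
    simp only [hdvd, Nat.cast_zero, ne_eq, not_true_eq_false, if_true, if_false]
    rw [Bool.if_false_right, Bool.and_true]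
    have hone : PySem.List.pyRange 0 (q : Int) 1 = PySem.List.pyRange 0 (q : Int) := rfl
    rw [hone, PySem.List.pyRange_zero_natCast, List.foldl_map, pyRepeat_eq_flatten]
    have hcast : ∀ k : Nat, ((k : Int) * (dv.length : Int)) = ((k * dv.length : Nat) : Int) := by
      intro k; push_cast; ring
    simp only [hcast, PySem.List.slice_natCast_add]
    rw [foldl_count_ite (fun k : Nat => (dd.drop (k * dv.length)).take dv.length = dv),
      Bool.eq_iff_iff]
    simp only [zero_add, Nat.cast_inj, decide_eq_true_eq, beq_iff_eq]
    have hcount := List.countP_eq_length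
      (p := fun x => decide ((dd.drop (x * dv.length)).take dv.length = dv)) (l := List.range q)
    simp only [List.length_range, List.mem_range, decide_eq_true_eq] at hcount
    rw [hcount, tiles dv q dd hlen]
    exact eq_comm
  · have hnd : ¬ ((dv.length : Int) ∣ (dd.length : Int)) := by
      rw [Int.natCast_dvd_natCast]
      exact fun h => hdvd (Nat.mod_eq_zero_of_dvd h)
    simp [hnd]
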